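-- pv_equiv track=rewrite | github.com/openstack-archive/deb-neutron-lbaas | neutron_lbaas/common/tls_utils/cert_parser.py | _split_x509s
-- ===== SOURCE A (Python) =====
-- X509_BEG = "-----BEGIN CERTIFICATE-----"
--
-- X509_END = "-----END CERTIFICATE-----"
--
-- def _split_x509s(x509Str):
--     """
--     Split the input string into individb(ual x509 text blocks
--
--     :param x509Str: A large multi x509 certificate blcok
--     :returns: A list of strings where each string represents an
--     X509 pem block surrounded by BEGIN CERTIFICATE,
--     END CERTIFICATE block tags
--     """
--     curr_pem_block = []
--     inside_x509 = False
--     for line in x509Str.replace("\r", "").split("\n"):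
--         if inside_x509:
--             curr_pem_block.append(line)
--             if line == X509_END:
--                 yield "\n".join(curr_pem_block)
--                 curr_pem_block = []
--                 inside_x509 = False
--             continue
--         else:
--             if line == X509_BEG:
--                 curr_pem_block.append(line)
--                 inside_x509 = True
-- ===== SOURCE B (Python) =====
-- X509_BEG = "-----BEGIN CERTIFICATE-----"
--
-- X509_END = "-----END CERTIFICATE-----"
--
--
-- def _split_x509s(x509Str):
--     """Index-and-slice re-implementation: locate each BEGIN line, then the
--     first END line after it, and yield the joined slice between them."""
--     lines = x509Str.replace("\r", "").split("\n")
--     while X509_BEG in lines: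
--         b = lines.index(X509_BEG)
--         rest = lines[b + 1:]
--         if X509_END not in rest:
--             return
--         e = rest.index(X509_END)
--         yield "\n".join([X509_BEG] + rest[:e + 1])
--         lines = rest[e + 1:]
-- ===== Notes on version B (the rewrite author's own statement) =====
-- stated objective: alternative
-- what changed: Replaces the per-line state machine (inside_x509 flag plus an accumulating buffer list) with an index-and-slice algorithm: repeatedly find the next BEGIN line and the first END line after it, yield the joined slice, and continue after it.
import Mathlib
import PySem

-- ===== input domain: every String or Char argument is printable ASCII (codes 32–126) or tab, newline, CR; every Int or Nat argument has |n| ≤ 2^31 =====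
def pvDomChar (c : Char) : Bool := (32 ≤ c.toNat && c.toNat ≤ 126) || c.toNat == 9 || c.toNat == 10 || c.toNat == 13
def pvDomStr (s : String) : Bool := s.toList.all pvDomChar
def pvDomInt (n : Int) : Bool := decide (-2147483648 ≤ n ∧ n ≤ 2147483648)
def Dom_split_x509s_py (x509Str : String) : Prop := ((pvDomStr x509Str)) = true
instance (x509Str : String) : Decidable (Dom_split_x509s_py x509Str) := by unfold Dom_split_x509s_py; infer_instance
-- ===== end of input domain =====

-- B replaces A's per-line state machine with an index-and-slice search; same return value (generator vs list: return values compared as lists).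

def pvX509Beg : String := "-----BEGIN CERTIFICATE-----"
def pvX509End : String := "-----END CERTIFICATE-----"

-- ===== PORT A =====
-- A's loop: state = (current pem block, inside_x509 flag); yields collected in order.
def pvLoopA : List String → List String → Bool → List String
  | [], _, _ => []
  | l :: ls, blk, inside =>
    if inside then
      if l = pvX509End then
        PySem.Str.join "\n" (blk ++ [l]) :: pvLoopA ls [] false
      else pvLoopA ls (blk ++ [l]) true
    else
      if l = pvX509Beg then pvLoopA ls (blk ++ [l]) true
      else pvLoopA ls blk false

def split_x509s_py (x509Str : String) : List String :=
  pvLoopA ((PySem.Str.split? (PySem.Str.replace x509Str "\r" "") "\n").getD []) [] false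

-- ===== PORT B =====
-- B's loop: find next BEGIN line, then the first END line after it, slice the block out, continue.
def pvGoB (lines : List String) : List String :=
  match hb : PySem.List.index? lines pvX509Beg with
  | none => []
  | some b =>
    let rest := lines.drop (b + 1)
    match PySem.List.index? rest pvX509End with
    | none => []
    | some e =>
      PySem.Str.join "\n" (pvX509Beg :: rest.take (e + 1)) :: pvGoB (rest.drop (e + 1))
termination_by lines.length
decreasing_by
  obtain ⟨hblt, -, -⟩ := PySem.List.getElem_of_index?_eq_some hb
  simp only [List.length_drop]
  omega

def split_x509s_py_alt (x509Str : String) : List String :=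
  pvGoB ((PySem.Str.split? (PySem.Str.replace x509Str "\r" "") "\n").getD [])

-- ===== PRECONDITION & SPEC =====
def Spec_split_x509s_py (x509Str : String) (out : List String) : Prop := out = split_x509s_py_alt x509Str
instance (x509Str : String) (out : List String) : Decidable (Spec_split_x509s_py x509Str out) := by unfold Spec_split_x509s_py; infer_instance

-- ===== CLAIM (what is proved, stated in full; the proofs are below) =====
def Claim_equal_split_x509s_py : Prop := ∀ (x509Str : String), Dom_split_x509s_py x509Str → Spec_split_x509s_py x509Str (split_x509s_py x509Str)

-- ===== LEMMAS AND PROOFS =====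

-- outside a block, lines without a BEGIN marker yield nothing
lemma pvLoopA_no_beg (ls : List String) (blk : List String) (h : pvX509Beg ∉ ls) :
    pvLoopA ls blk false = [] := by
  induction ls generalizing blk with
  | nil => rfl
  | cons l t ih =>
    simp only [List.mem_cons, not_or] at h
    simp [pvLoopA, Ne.symm h.1, ih _ h.2]

-- outside a block, a BEGIN-free prefix is skipped
lemma pvLoopA_skip (pre ls : List String) (blk : List String) (h : pvX509Beg ∉ pre) :
    pvLoopA (pre ++ ls) blk false = pvLoopA ls blk false := by
  induction pre generalizing blk with
  | nil => rfl
  | cons l t ih =>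
    simp only [List.mem_cons, not_or] at h
    simp [pvLoopA, Ne.symm h.1, ih _ h.2]

-- inside a block, lines without an END marker yield nothing
lemma pvLoopA_no_end (ls : List String) (blk : List String) (h : pvX509End ∉ ls) :
    pvLoopA ls blk true = [] := by
  induction ls generalizing blk with
  | nil => rfl
  | cons l t ih =>
    simp only [List.mem_cons, not_or] at h
    simp [pvLoopA, Ne.symm h.1, ih _ h.2]

-- inside a block, A collects up to the first END line, emits the join, and resets
lemma pvLoopA_until_end (pre ls : List String) (blk : List String) (h : pvX509End ∉ pre) :
    pvLoopA (pre ++ pvX509End :: ls) blk true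
      = PySem.Str.join "\n" (blk ++ pre ++ [pvX509End]) :: pvLoopA ls [] false := by
  induction pre generalizing blk with
  | nil => simp [pvLoopA]
  | cons l t ih =>
    simp only [List.mem_cons, not_or] at h
    simp only [List.cons_append, pvLoopA, if_neg (Ne.symm h.1), ih _ h.2]
    simp [List.append_assoc]

-- main list-level equivalence of the two loops
lemma pvLoopA_eq_pvGoB (lines : List String) : pvLoopA lines [] false = pvGoB lines := by
  induction hn : lines.length using Nat.strong_induction_on generalizing lines with
  | _ n ih =>
  rw [pvGoB.eq_def]
  cases hb : PySem.List.index? lines pvX509Beg with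
  | none =>
    dsimp only
    exact pvLoopA_no_beg _ _ ((PySem.List.index?_eq_none_iff _ _).1 hb)
  | some b =>
    dsimp only
    obtain ⟨pre, suf, hsplit, hlen, hnot⟩ := (PySem.List.index?_eq_some_iff _ _ _).1 hb
    have hdrop : lines.drop (b + 1) = suf := by
      subst hsplit; rw [← hlen]
      simp
    rw [hdrop]
    cases he : PySem.List.index? suf pvX509End with
    | none =>
      have h1 : pvLoopA lines [] false = pvLoopA suf [pvX509Beg] true := by
        subst hsplit
        rw [pvLoopA_skip pre _ [] hnot]
        simp [pvLoopA]
      rw [h1]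
      exact pvLoopA_no_end _ _ ((PySem.List.index?_eq_none_iff _ _).1 he)
    | some e =>
      obtain ⟨pre2, suf2, hsplit2, hlen2, hnot2⟩ := (PySem.List.index?_eq_some_iff _ _ _).1 he
      have htake : suf.take (e + 1) = pre2 ++ [pvX509End] := by
        subst hsplit2; rw [← hlen2]
        rw [show pre2 ++ pvX509End :: suf2 = (pre2 ++ [pvX509End]) ++ suf2 by simp,
            show pre2.length + 1 = (pre2 ++ [pvX509End]).length by simp]
        exact List.take_left
      have hdrop2 : suf.drop (e + 1) = suf2 := by
        subst hsplit2; rw [← hlen2]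
        simp
      have h1 : pvLoopA lines [] false = pvLoopA suf [pvX509Beg] true := by
        subst hsplit
        rw [pvLoopA_skip pre _ [] hnot]
        simp [pvLoopA]
      have hrec : suf2.length < n := by
        subst hn; subst hsplit; subst hsplit2; simp; omega
      dsimp only
      rw [htake, hdrop2, h1, hsplit2, pvLoopA_until_end pre2 suf2 [pvX509Beg] hnot2,
          ih suf2.length hrec suf2 rfl]
      simp

-- ===== VERDICT (by name: the statement is the Claim_ definition above) =====
theorem split_x509s_py_spec : Claim_equal_split_x509s_py := by
  intro s _
  unfold Spec_split_x509s_py split_x509s_py split_x509s_py_alt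
  exact pvLoopA_eq_pvGoB _
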